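-- pv_equiv track=rewrite | github.com/tanhiowyatt/cyanide-honeypot | src/cyanide/vfs/commands/ls.py | _parse_ls_args
-- ===== SOURCE A (Python) =====
-- def _parse_ls_args(args: list[str]) -> tuple[bool, bool, bool, list[str]]:
--     """Parse ls arguments for flags and paths."""
--     show_all = False
--     long_format = False
--     recursive = False
--     paths = []
--     for arg in args:
--         if arg.startswith("-"):
--             if "a" in arg:
--                 show_all = True
--             if "l" in arg:
--                 long_format = True
--             if "R" in arg:
--                 recursive = True
--         else:
--             paths.append(arg)
--     return show_all, long_format, recursive, paths
-- ===== SOURCE B (Python) =====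
-- def _parse_ls_args(args: list[str]) -> tuple[bool, bool, bool, list[str]]:
--     """Parse ls arguments for flags and paths."""
--     flag_blob = "".join(a for a in args if a.startswith("-"))
--     paths = [a for a in args if not a.startswith("-")]
--     return "a" in flag_blob, "l" in flag_blob, "R" in flag_blob, paths
-- ===== Notes on version B (the rewrite author's own statement) =====
-- stated objective: idiomatic
-- what changed: B replaces A's single fused loop updating four accumulators by a declarative decomposition: two filters split args into paths and flags, the flag arguments are joined into one string, and each boolean is a single membership test on that joined string.
import Mathlib
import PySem

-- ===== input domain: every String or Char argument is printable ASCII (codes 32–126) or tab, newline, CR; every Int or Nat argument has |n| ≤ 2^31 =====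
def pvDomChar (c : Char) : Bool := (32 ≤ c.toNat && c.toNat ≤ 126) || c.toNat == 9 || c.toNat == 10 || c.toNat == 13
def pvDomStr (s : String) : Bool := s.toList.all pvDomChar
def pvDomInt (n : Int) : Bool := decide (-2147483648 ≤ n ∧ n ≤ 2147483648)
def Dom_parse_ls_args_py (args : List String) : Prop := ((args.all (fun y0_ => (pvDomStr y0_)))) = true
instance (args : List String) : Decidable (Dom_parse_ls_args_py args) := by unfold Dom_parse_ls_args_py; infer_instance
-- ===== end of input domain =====

-- B replaces A's fused four-accumulator loop by two filters and one joined flag string with one membership test per flag (idiomatic decomposition, same cost).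

-- ===== PORT A =====
-- one loop step of A: update the four accumulators for one argument
def pvStepA (st : Bool × Bool × Bool × List String) (arg : String) : Bool × Bool × Bool × List String :=
  if PySem.Str.startswith arg "-" then
    ((if PySem.Str.isIn "a" arg then true else st.1),
     (if PySem.Str.isIn "l" arg then true else st.2.1),
     (if PySem.Str.isIn "R" arg then true else st.2.2.1),
     st.2.2.2)
  else
    (st.1, st.2.1, st.2.2.1, st.2.2.2 ++ [arg])

def parse_ls_args_py (args : List String) : Bool × Bool × Bool × List String :=
  args.foldl pvStepA (false, false, false, [])

-- ===== PORT B =====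
def parse_ls_args_py_alt (args : List String) : Bool × Bool × Bool × List String :=
  let flagBlob := PySem.Str.join "" (args.filter (fun a => PySem.Str.startswith a "-"))
  let paths := args.filter (fun a => !(PySem.Str.startswith a "-"))
  (PySem.Str.isIn "a" flagBlob, PySem.Str.isIn "l" flagBlob, PySem.Str.isIn "R" flagBlob, paths)

-- ===== PRECONDITION & SPEC =====
def Spec_parse_ls_args_py (args : List String) (out : Bool × Bool × Bool × List String) : Prop := out = parse_ls_args_py_alt args
instance (args : List String) (out : Bool × Bool × Bool × List String) : Decidable (Spec_parse_ls_args_py args out) := by unfold Spec_parse_ls_args_py; infer_instance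

-- ===== CLAIM (what is proved, stated in full; the proofs are below) =====
def Claim_equal_parse_ls_args_py : Prop := ∀ (args : List String), Dom_parse_ls_args_py args → Spec_parse_ls_args_py args (parse_ls_args_py args)

-- ===== LEMMAS AND PROOFS =====

-- A's loop, characterized: each flag is an 'any' over the arguments, paths a filter
theorem pvFoldA_spec (args : List String) (sa lf rc : Bool) (ps : List String) :
    args.foldl pvStepA (sa, lf, rc, ps) =
      (sa || args.any (fun a => PySem.Str.startswith a "-" && PySem.Str.isIn "a" a),
       lf || args.any (fun a => PySem.Str.startswith a "-" && PySem.Str.isIn "l" a),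
       rc || args.any (fun a => PySem.Str.startswith a "-" && PySem.Str.isIn "R" a),
       ps ++ args.filter (fun a => !(PySem.Str.startswith a "-"))) := by
  induction args generalizing sa lf rc ps with
  | nil => simp
  | cons x xs ih =>
    by_cases h : PySem.Str.startswith x "-" = true <;>
      simp [pvStepA, ih] <;>
      split_ifs <;>
      simp_all [Bool.or_comm, Bool.or_assoc]

-- "".join with empty separator is flatten
theorem pvJoin_nil_eq_flatten (ls : List (List Char)) : PySem.Chars.join [] ls = ls.flatten := by
  induction ls with
  | nil => rfl
  | cons h t ih =>
    cases t with
    | nil => simp [PySem.Chars.join, List.intercalate]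
    | cons h2 t2 =>
      simp only [PySem.Chars.join, List.intercalate] at *
      simp_all [List.intersperse]

-- a one-character substring test on the joined flag strings is an 'any' over them
theorem pvIsIn_single_join (c : Char) (flags : List String) :
    PySem.Chars.isIn [c] (PySem.Chars.join [] (flags.map String.toList)) =
      flags.any (fun s => PySem.Chars.isIn [c] s.toList) := by
  rw [Bool.eq_iff_iff]
  simp [pvJoin_nil_eq_flatten, PySem.Chars.isIn_iff_infix, List.singleton_infix_iff,
        List.mem_flatten]

-- ===== VERDICT (by name: the statement is the Claim_ definition above) =====
theorem parse_ls_args_py_spec : Claim_equal_parse_ls_args_py := by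
  intro args _
  show parse_ls_args_py args = parse_ls_args_py_alt args
  simp only [parse_ls_args_py, parse_ls_args_py_alt, pvFoldA_spec]
  simp only [PySem.Str.isIn_eq, PySem.Str.toList_join, PySem.Str.startswith_eq]
  have hsep : ("" : String).toList = [] := rfl
  have ha : ("a" : String).toList = ['a'] := rfl
  have hl : ("l" : String).toList = ['l'] := rfl
  have hR : ("R" : String).toList = ['R'] := rfl
  rw [hsep, ha, hl, hR]
  simp only [pvIsIn_single_join, List.any_filter, Bool.false_or, List.nil_append]
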